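-- pv_equiv track=rewrite | github.com/kimjihw/Programmers | Level 0/컨트롤제트.py | solution
-- ===== SOURCE A (Python) =====
-- def solution(s):
--     answer = 0
--     lst = []
--     lst.extend(s.split(" "))
--     rst = []
--     for i in lst:
--         if i == "Z":
--            rst.pop()
--         else:
--             rst.append(int(i))
--     answer = sum(rst)
--     return answer
-- ===== SOURCE B (Python) =====
-- def solution(s):
--     total = 0
--     skip = 0
--     for tok in reversed(s.split(" ")):
--         if tok == "Z":
--             skip += 1
--         elif skip > 0:
--             skip -= 1
--         else:
--             total += int(tok)
--     return total
-- ===== Notes on version B (the rewrite author's own statement) =====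
-- stated objective: alternative
-- what changed: Replaces the stack-then-sum algorithm by a single reversed pass that keeps no stack at all: a pending-Z skip counter decides which numbers are cancelled and a running total accumulates the survivors.
-- outside the precondition, e.g. on solution('Z'): A raises IndexError, B returns 0
import Mathlib
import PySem

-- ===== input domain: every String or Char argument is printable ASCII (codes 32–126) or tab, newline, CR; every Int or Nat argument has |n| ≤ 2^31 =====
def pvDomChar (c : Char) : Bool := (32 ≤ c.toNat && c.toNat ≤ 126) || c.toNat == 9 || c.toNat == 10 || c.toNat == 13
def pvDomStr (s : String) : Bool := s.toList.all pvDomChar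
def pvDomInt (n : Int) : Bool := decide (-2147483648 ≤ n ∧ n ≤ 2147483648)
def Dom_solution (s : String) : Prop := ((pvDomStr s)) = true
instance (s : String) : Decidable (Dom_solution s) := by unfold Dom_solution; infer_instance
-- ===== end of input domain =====

-- B replaces A's stack-then-sum with a single reversed pass using a pending-Z skip counter
-- and a running total (no stack); same cost, different algorithm ("alternative").


-- tokens of s.split(" ") (shared input parsing; split? is none only for an empty separator,
-- so the ["0"] default is unreachable)
def pyTokens (s : String) : List String := (PySem.Str.split? s " ").getD ["0"]

-- ===== PORT A =====
-- A's loop: keep a stack rst; "Z" pops (IndexError if empty → none), otherwise int(i) pushes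
def solFwd (rst : List Int) : List String → Option (List Int)
  | [] => some rst
  | i :: rest =>
    if i = "Z" then
      if rst = [] then none else solFwd rst.dropLast rest
    else
      match PySem.Int.ofStr? i with
      | none => none
      | some v => solFwd (rst ++ [v]) rest

def solution (s : String) : Int :=
  match solFwd [] (pyTokens s) with
  | some rst => rst.sum
  | none => 0   -- unreachable under Pre_solution (A raises there)

-- ===== PORT B =====
-- B's loop: iterate over the reversed token list with (total, skip); int(tok) only when skip = 0
def solBwdLoop : List String → Int × Nat → Option (Int × Nat)
  | [], st => some st
  | tok :: rest, (total, skip) =>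
    if tok = "Z" then solBwdLoop rest (total, skip + 1)
    else if skip > 0 then solBwdLoop rest (total, skip - 1)
    else
      match PySem.Int.ofStr? tok with
      | none => none
      | some v => solBwdLoop rest (total + v, skip)

def solution_alt (s : String) : Int :=
  match solBwdLoop (pyTokens s).reverse (0, 0) with
  | some (total, _) => total
  | none => 0   -- unreachable under Pre_solution (B raises there)

-- ===== PRECONDITION & SPEC =====
-- Pre_ excludes exactly the inputs on which A raises: a token that is neither "Z" nor a
-- valid int literal (ValueError), or a prefix with more "Z"s than numbers (IndexError on pop).
def Pre_solution (s : String) : Prop :=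
  (∀ tok ∈ pyTokens s, tok = "Z" ∨ (PySem.Int.ofStr? tok).isSome = true) ∧
  (∀ j ∈ List.range ((pyTokens s).length + 1),
    ((pyTokens s).take j).countP (· == "Z") ≤
    ((pyTokens s).take j).countP (· ≠ "Z"))
instance (s : String) : Decidable (Pre_solution s) := by unfold Pre_solution; infer_instance
def pvWitness_solution : String := "7 007 Z 1_0 Z -2 +5 0 Z Z 6"
def Spec_solution (s : String) (out : Int) : Prop := out = solution_alt s
instance (s : String) (out : Int) : Decidable (Spec_solution s out) := by unfold Spec_solution; infer_instance

-- ===== CLAIM (what is proved, stated in full; the proofs are below) =====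
def Claim_equal_solution : Prop := ∀ (s : String), Dom_solution s → Pre_solution s → Spec_solution s (solution s)

-- ===== LEMMAS AND PROOFS =====

-- structural right-to-left processing: process rest (the later tokens) first, then the head
def solBwd : List String → Option (Int × Nat)
  | [] => some (0, 0)
  | i :: rest =>
    match solBwd rest with
    | none => none
    | some (t, k) =>
      if i = "Z" then some (t, k + 1)
      else if k > 0 then some (t, k - 1)
      else
        match PySem.Int.ofStr? i with
        | none => none
        | some v => some (t + v, k)

theorem solBwdLoop_append (l1 l2 : List String) (st : Int × Nat) :
    solBwdLoop (l1 ++ l2) st =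
      match solBwdLoop l1 st with
      | none => none
      | some st' => solBwdLoop l2 st' := by
  induction l1 generalizing st with
  | nil => simp [solBwdLoop]
  | cons a l ih =>
    obtain ⟨t, k⟩ := st
    simp only [List.cons_append, solBwdLoop]
    split_ifs with h1 h2
    · exact ih _
    · exact ih _
    · cases PySem.Int.ofStr? a <;> simp [ih]

theorem solBwdLoop_eq_solBwd (l : List String) :
    solBwdLoop l.reverse (0, 0) = solBwd l := by
  induction l with
  | nil => rfl
  | cons i rest ih =>
    have hrev : (i :: rest).reverse = rest.reverse ++ [i] := by simp
    rw [hrev, solBwdLoop_append, ih, solBwd]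
    cases solBwd rest with
    | none => rfl
    | some st =>
      obtain ⟨t, k⟩ := st
      simp only [solBwdLoop]

-- main simulation: if A's forward stack run succeeds, B's backward run succeeds and its
-- unmatched-Z count k pops the top k elements of the initial stack, the total being the rest
theorem solFwd_solBwd (l : List String) (st st' : List Int)
    (h : solFwd st l = some st') :
    ∃ t k, solBwd l = some (t, k) ∧ k ≤ st.length ∧
      st'.sum = (st.take (st.length - k)).sum + t := by
  induction l generalizing st st' with
  | nil =>
    simp only [solFwd, Option.some.injEq] at h
    exact ⟨0, 0, rfl, Nat.zero_le _, by simp [← h]⟩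
  | cons i rest ih =>
    simp only [solFwd] at h
    by_cases hz : i = "Z"
    · rw [if_pos hz] at h
      split_ifs at h with hnil
      obtain ⟨t, k, hb, hk, hs⟩ := ih _ _ h
      have hlen : st.dropLast.length = st.length - 1 := by simp
      have h1 : 1 ≤ st.length := by
        cases st with
        | nil => exact absurd rfl hnil
        | cons a l => simp
      refine ⟨t, k + 1, ?_, by omega, ?_⟩
      · rw [solBwd, hb]; simp [hz]
      · rw [hs, hlen]
        have h2 : st.length - (k + 1) = st.length - 1 - k := by omega
        rw [h2]
        congr 2
        rw [List.dropLast_eq_take, List.take_take]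
        congr 1
        omega
    · rw [if_neg hz] at h
      cases hp : PySem.Int.ofStr? i with
      | none => rw [hp] at h; exact absurd h (by simp)
      | some v =>
        rw [hp] at h
        obtain ⟨t, k, hb, hk, hs⟩ := ih _ _ h
        have hlen : (st ++ [v]).length = st.length + 1 := by simp
        rw [hlen] at hk hs
        by_cases hk0 : k = 0
        · subst hk0
          refine ⟨t + v, 0, ?_, Nat.zero_le _, ?_⟩
          · rw [solBwd, hb]; simp [hz, hp]
          · rw [hs]
            simp only [Nat.sub_zero]
            rw [List.take_of_length_le (by simp), List.take_of_length_le (le_refl _)]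
            simp
            ring
        · refine ⟨t, k - 1, ?_, by omega, ?_⟩
          · rw [solBwd, hb]; simp only []
            rw [if_neg hz, if_pos (by omega)]
          · rw [hs]
            congr 2
            have h1 : st.length + 1 - k = st.length - (k - 1) := by omega
            rw [h1, List.take_append_of_le_length (by omega)]

theorem countZ_cons (a : String) (l : List String) :
    (a :: l).countP (· == "Z") = (if a = "Z" then 1 else 0) + l.countP (· == "Z") := by
  by_cases h : a = "Z" <;> simp [h, Nat.add_comm]

theorem countN_cons (a : String) (l : List String) :
    (a :: l).countP (· ≠ "Z") = (if a = "Z" then 0 else 1) + l.countP (· ≠ "Z") := by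
  by_cases h : a = "Z" <;> simp [h, Nat.add_comm]

-- A succeeds under the (generalized) no-underflow condition
theorem solFwd_isSome (l : List String) (st : List Int)
    (hp : ∀ tok ∈ l, tok = "Z" ∨ (PySem.Int.ofStr? tok).isSome = true)
    (hc : ∀ j ≤ l.length, (l.take j).countP (· == "Z") ≤ (l.take j).countP (· ≠ "Z") + st.length) :
    ∃ st', solFwd st l = some st' := by
  induction l generalizing st with
  | nil => exact ⟨st, rfl⟩
  | cons i rest ih =>
    by_cases hz : i = "Z"
    · have h1 := hc 1 (by simp)
      rw [List.take_succ_cons, List.take_zero, countZ_cons, countN_cons, if_pos hz, if_pos hz] at h1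
      simp only [List.countP_nil] at h1
      have hnil : st ≠ [] := by
        intro he; rw [he] at h1; simp at h1
      obtain ⟨st', h'⟩ := ih st.dropLast
        (fun tok ht => hp tok (List.mem_cons_of_mem _ ht))
        (by
          intro j hj
          have h2 := hc (j + 1) (by simpa using Nat.succ_le_succ hj)
          rw [List.take_succ_cons, countZ_cons, countN_cons, if_pos hz, if_pos hz] at h2
          rw [List.length_dropLast]
          have h3 : 1 ≤ st.length := by
            cases st with
            | nil => exact absurd rfl hnil
            | cons a l => simp
          omega)
      exact ⟨st', by rw [solFwd, if_pos hz, if_neg hnil]; exact h'⟩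
    · rcases hp i (List.mem_cons_self) with h | h
      · exact absurd h hz
      · obtain ⟨v, hv⟩ := Option.isSome_iff_exists.mp h
        obtain ⟨st', h'⟩ := ih (st ++ [v])
          (fun tok ht => hp tok (List.mem_cons_of_mem _ ht))
          (by
            intro j hj
            have h2 := hc (j + 1) (by simpa using Nat.succ_le_succ hj)
            rw [List.take_succ_cons, countZ_cons, countN_cons, if_neg hz, if_neg hz] at h2
            rw [List.length_append]
            simp only [List.length_cons, List.length_nil]
            omega)
        exact ⟨st', by rw [solFwd, if_neg hz, hv]; exact h'⟩

-- ===== VERDICT (by name: the statement is the Claim_ definition above) =====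
theorem solution_spec : Claim_equal_solution := by
  intro s _ hpre
  obtain ⟨hp, hc⟩ := hpre
  unfold Spec_solution solution solution_alt
  obtain ⟨st', hA⟩ := solFwd_isSome (pyTokens s) [] hp
    (by intro j hj; simpa using hc j (List.mem_range.mpr (by omega)))
  obtain ⟨t, k, hb, hk, hs⟩ := solFwd_solBwd _ _ _ hA
  have hk0 : k = 0 := Nat.le_zero.mp (by simpa using hk)
  subst hk0
  rw [hA, solBwdLoop_eq_solBwd, hb]
  simpa using hs
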